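-- pv_equiv track=rewrite | github.com/CheesecakeTV/LLL_Pythonkurs | Übungen/Lösungen/Übung 11-5.py | istAhnlich
-- ===== SOURCE A (Python) =====
-- def istAhnlich(derText:str, suchtext:str) -> bool:
--     derText, suchtext = derText.casefold(), suchtext.casefold()
--
--     if suchtext in derText:
--         return True
--
--     if len(suchtext) < 2:
--         return False
--
--     for n in range(len(suchtext)):
--         splittext = suchtext[:n] + suchtext[n + 1:]
--         if splittext in derText:
--             return True
--
--     return False
-- ===== SOURCE B (Python) =====
-- def _lcp(s, seg):
--     p = 0
--     while p < len(seg) and s[p] == seg[p]: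
--         p += 1
--     return p
--
-- def istAhnlich(derText: str, suchtext: str) -> bool:
--     t = derText.casefold()
--     s = suchtext.casefold()
--     L = len(s)
--     for i in range(len(t) + 1):
--         if t[i:i + L] == s:
--             return True
--         if L >= 2:
--             seg = t[i:i + L - 1]
--             if len(seg) == L - 1:
--                 p = _lcp(s, seg)
--                 if s[p + 1:] == seg[p:]:
--                     return True
--     return False
-- ===== Notes on version B (the rewrite author's own statement) =====
-- stated objective: faster
-- what changed: Instead of generating each of the m one-deletion variants of the pattern and running a separate substring search for each, B makes a single scan over the start positions of the text and decides an exact or one-deletion match at each position via a longest-common-prefix computation plus one suffix comparison.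
import Mathlib
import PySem

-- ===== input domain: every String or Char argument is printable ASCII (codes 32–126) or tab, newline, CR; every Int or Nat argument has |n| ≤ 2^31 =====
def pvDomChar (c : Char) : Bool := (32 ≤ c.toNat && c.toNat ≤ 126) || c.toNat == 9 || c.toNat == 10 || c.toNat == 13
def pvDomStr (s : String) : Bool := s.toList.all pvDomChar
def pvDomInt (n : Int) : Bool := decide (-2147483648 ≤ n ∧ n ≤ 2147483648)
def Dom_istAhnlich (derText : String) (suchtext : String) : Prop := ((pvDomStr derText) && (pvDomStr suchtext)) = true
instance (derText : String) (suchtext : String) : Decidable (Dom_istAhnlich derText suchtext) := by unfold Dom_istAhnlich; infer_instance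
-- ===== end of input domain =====

-- B replaces A's "build every one-deletion variant and substring-search each" by one scan over
-- text start positions with an LCP + suffix comparison at each (measured faster in a timing run).
-- str.casefold is ported as PySem lower (identical on the ASCII domain Dom_istAhnlich).

-- ===== PORT A =====
def istAhnlich (derText : String) (suchtext : String) : Bool :=
  let t := PySem.Chars.lower derText.toList
  let s := PySem.Chars.lower suchtext.toList
  if PySem.Chars.isIn s t then true
  else if PySem.List.len s < 2 then false
  else
    (PySem.List.pyRange 0 (PySem.List.len s) 1).any (fun n =>
      PySem.Chars.isIn (PySem.List.slice s none (some n) ++ PySem.List.slice s (some (n + 1)) none) t)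

-- ===== PORT B =====
-- Source B's _lcp: advance p while both sides still have a character there and the characters agree
def lcpChars : List Char → List Char → Nat
  | a :: as, b :: bs => if a = b then lcpChars as bs + 1 else 0
  | _, _ => 0

def istAhnlich_alt (derText : String) (suchtext : String) : Bool :=
  let t := PySem.Chars.lower derText.toList
  let s := PySem.Chars.lower suchtext.toList
  let L := PySem.List.len s
  (PySem.List.pyRange 0 (PySem.List.len t + 1) 1).any (fun i =>
    (PySem.List.slice t (some i) (some (i + L)) == s) ||
    (decide (2 ≤ L) &&
      (let seg := PySem.List.slice t (some i) (some (i + L - 1))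
       (PySem.List.len seg == L - 1) &&
       (let p : Nat := lcpChars s seg
        PySem.List.slice s (some ((p : Int) + 1)) none == PySem.List.slice seg (some (p : Int)) none))))

-- ===== PRECONDITION & SPEC =====
def Spec_istAhnlich (derText : String) (suchtext : String) (out : Bool) : Prop := out = istAhnlich_alt derText suchtext
instance (derText : String) (suchtext : String) (out : Bool) : Decidable (Spec_istAhnlich derText suchtext out) := by unfold Spec_istAhnlich; infer_instance

-- ===== CLAIM (what is proved, stated in full; the proofs are below) =====
def Claim_equal_istAhnlich : Prop := ∀ (derText : String) (suchtext : String), Dom_istAhnlich derText suchtext → Spec_istAhnlich derText suchtext (istAhnlich derText suchtext)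

-- ===== LEMMAS AND PROOFS =====

-- the common occurrence predicate, in "window" form:
-- s occurs exactly at some start i, or (|s| ≥ 2 and) some one-deletion of s fills the window of
-- length |s|-1 at some start i
def OccQ (t s : List Char) : Prop :=
  (∃ i, i + s.length ≤ t.length ∧ (t.drop i).take s.length = s) ∨
  (2 ≤ s.length ∧ ∃ i, i + (s.length - 1) ≤ t.length ∧
    ∃ n < s.length, s.take n ++ s.drop (n + 1) = (t.drop i).take (s.length - 1))

theorem lcp_le_right (a b : List Char) : lcpChars a b ≤ b.length := by
  induction a generalizing b with
  | nil => cases b <;> simp [lcpChars]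
  | cons x as ih =>
    cases b with
    | nil => simp [lcpChars]
    | cons y bs =>
      by_cases h : x = y <;> simp [lcpChars, h]
      exact ih bs

theorem take_lcp (a b : List Char) : a.take (lcpChars a b) = b.take (lcpChars a b) := by
  induction a generalizing b with
  | nil => cases b <;> simp [lcpChars]
  | cons x as ih =>
    cases b with
    | nil => simp [lcpChars]
    | cons y bs =>
      by_cases h : x = y <;> simp [lcpChars, h, ih bs]

theorem le_lcp (a b : List Char) (n : Nat) (hn : n ≤ a.length) (h : a.take n = b.take n) :
    n ≤ lcpChars a b := by
  induction n generalizing a b with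
  | zero => exact Nat.zero_le _
  | succ m ih =>
    cases a with
    | nil => simp at hn
    | cons x as =>
      cases b with
      | nil => simp at h
      | cons y bs =>
        simp [List.take_succ_cons] at h
        obtain ⟨rfl, h2⟩ := h
        simp only [lcpChars]
        exact Nat.succ_le_succ (ih as bs (by simpa using hn) h2)

-- the crux: a window seg of length |s|-1 is a one-deletion of s iff, with p the longest common
-- prefix of s and seg, the rest of seg equals the rest of s after skipping one character
theorem crux (s seg : List Char) (hlen : seg.length + 1 = s.length) :
    (s.drop (lcpChars s seg + 1) = seg.drop (lcpChars s seg)) ↔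
      ∃ n < s.length, s.take n ++ s.drop (n + 1) = seg := by
  constructor
  · intro h
    refine ⟨lcpChars s seg, ?_, ?_⟩
    · have := lcp_le_right s seg; omega
    · rw [take_lcp s seg, h, List.take_append_drop]
  · rintro ⟨n, hn, hdel⟩
    have htakelen : (s.take n).length = n := by simp; omega
    have htake : s.take n = seg.take n := by
      rw [← hdel, List.take_append_of_le_length (by omega), List.take_take]
      simp
    have hdrop : seg.drop n = s.drop (n + 1) := by
      rw [← hdel, List.drop_append_of_le_length (by omega)]
      simp
    have hnp : n ≤ lcpChars s seg := le_lcp s seg n (by omega) htake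
    have h1 : seg.drop (lcpChars s seg) = (seg.drop n).drop (lcpChars s seg - n) := by
      rw [List.drop_drop]; congr 1; omega
    rw [h1, hdrop, List.drop_drop]
    congr 1; omega

theorem length_del (s : List Char) (n : Nat) (h : n < s.length) :
    (s.take n ++ s.drop (n + 1)).length = s.length - 1 := by
  simp; omega

-- u occurs in t iff some full-length window of t equals u
theorem infix_iff_window (u t : List Char) :
    u <:+: t ↔ ∃ i, i + u.length ≤ t.length ∧ (t.drop i).take u.length = u := by
  constructor
  · rintro ⟨pre, suf, rfl⟩
    refine ⟨pre.length, by simp, ?_⟩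
    rw [List.append_assoc, List.drop_left, List.take_left]
  · rintro ⟨i, hi, h⟩
    rw [← h]
    exact ((t.drop i).take_prefix u.length).isInfix.trans ((t.drop_suffix i).isInfix)

theorem A_iff (t s : List Char) :
    (if PySem.Chars.isIn s t then true
     else if PySem.List.len s < 2 then false
     else (PySem.List.pyRange 0 (PySem.List.len s) 1).any (fun n =>
       PySem.Chars.isIn (PySem.List.slice s none (some n) ++ PySem.List.slice s (some (n + 1)) none) t)) = true
    ↔ OccQ t s := by
  by_cases h1 : PySem.Chars.isIn s t
  · simp only [h1, if_pos, true_iff]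
    exact Or.inl ((infix_iff_window s t).mp ((PySem.Chars.isIn_iff_infix s t).mp h1))
  · have hni : ¬ s <:+: t := (PySem.Chars.isIn_eq_false_iff s t).mp (by simpa using h1)
    simp only [Bool.not_eq_true] at h1
    rw [if_neg (by simp [h1])]
    by_cases h2 : PySem.List.len s < 2
    · rw [if_pos h2]
      rw [PySem.List.len_eq] at h2
      simp only [Bool.false_eq_true, false_iff, OccQ]
      rintro (⟨i, hi, hw⟩ | ⟨hL, -⟩)
      · exact hni ((infix_iff_window s t).mpr ⟨i, hi, hw⟩)
      · omega
    · rw [if_neg h2]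
      rw [PySem.List.len_eq] at h2 ⊢
      have hL : 2 ≤ s.length := by omega
      rw [PySem.List.pyRange_zero_natCast, List.any_map, List.any_eq_true]
      simp only [Function.comp]
      constructor
      · rintro ⟨m, hm, hin⟩
        rw [List.mem_range] at hm
        rw [PySem.List.slice_to_natCast] at hin
        rw [show ((m : Int) + 1) = ((m + 1 : Nat) : Int) by push_cast; ring] at hin
        rw [PySem.List.slice_from_natCast] at hin
        have hinf := (PySem.Chars.isIn_iff_infix _ t).mp hin
        obtain ⟨i, hi, hw⟩ := (infix_iff_window _ t).mp hinf
        rw [length_del s m hm] at hi hw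
        exact Or.inr ⟨hL, i, hi, m, hm, hw.symm⟩
      · rintro (he | ⟨-, i, hi, n, hn, hw⟩)
        · exact absurd ((infix_iff_window s t).mpr he) hni
        · refine ⟨n, by simpa using hn, ?_⟩
          rw [PySem.List.slice_to_natCast]
          rw [show ((n : Int) + 1) = ((n + 1 : Nat) : Int) by push_cast; ring]
          rw [PySem.List.slice_from_natCast]
          rw [PySem.Chars.isIn_iff_infix]
          apply (infix_iff_window _ t).mpr
          refine ⟨i, ?_, ?_⟩ <;> rw [length_del s n hn]
          · exact hi
          · exact hw.symm
      
theorem B_iff (t s : List Char) :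
    ((PySem.List.pyRange 0 (PySem.List.len t + 1) 1).any (fun i =>
      (PySem.List.slice t (some i) (some (i + PySem.List.len s)) == s) ||
      (decide (2 ≤ PySem.List.len s) &&
        ((PySem.List.len (PySem.List.slice t (some i) (some (i + PySem.List.len s - 1))) == PySem.List.len s - 1) &&
         (PySem.List.slice s (some ((lcpChars s (PySem.List.slice t (some i) (some (i + PySem.List.len s - 1))) : Int) + 1)) none ==
          PySem.List.slice (PySem.List.slice t (some i) (some (i + PySem.List.len s - 1))) (some ((lcpChars s (PySem.List.slice t (some i) (some (i + PySem.List.len s - 1))) : Int))) none)))) = true)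
    ↔ OccQ t s := by
  rw [PySem.List.len_eq t, PySem.List.len_eq s]
  rw [show ((t.length : Int) + 1) = ((t.length + 1 : Nat) : Int) by push_cast; ring]
  rw [PySem.List.pyRange_zero_natCast, List.any_map, List.any_eq_true]
  simp only [Function.comp]
  constructor
  · rintro ⟨m, hm, hc⟩
    rw [List.mem_range] at hm
    rw [Bool.or_eq_true] at hc
    rcases hc with hc | hc
    · rw [beq_iff_eq, PySem.List.slice_natCast_add] at hc
      left
      refine ⟨m, ?_, hc⟩
      have := congrArg List.length hc
      simp at this
      omega
    · simp only [Bool.and_eq_true, decide_eq_true_eq] at hc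
      obtain ⟨hL2, hlenb, hlcp⟩ := hc
      have hL2' : 2 ≤ s.length := by exact_mod_cast hL2
      rw [show ((m : Int) + (s.length : Int) - 1) = ((m : Int) + ((s.length - 1 : Nat) : Int)) by omega] at hlenb hlcp
      rw [PySem.List.slice_natCast_add] at hlenb hlcp
      rw [PySem.List.len_eq] at hlenb
      rw [beq_iff_eq] at hlenb
      have hwin : m + (s.length - 1) ≤ t.length := by
        simp at hlenb; omega
      have hseglen : ((t.drop m).take (s.length - 1)).length + 1 = s.length := by
        simp; omega
      rw [beq_iff_eq, show ((lcpChars s ((t.drop m).take (s.length - 1)) : Int) + 1) = ((lcpChars s ((t.drop m).take (s.length - 1)) + 1 : Nat) : Int) by push_cast; ring] at hlcp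
      rw [PySem.List.slice_from_natCast, PySem.List.slice_from_natCast] at hlcp
      obtain ⟨n, hn, hdel⟩ := (crux s _ hseglen).mp hlcp
      exact Or.inr ⟨hL2', m, hwin, n, hn, hdel⟩
  · rintro (⟨i, hi, hw⟩ | ⟨hL2, i, hi, n, hn, hdel⟩)
    · refine ⟨i, by rw [List.mem_range]; omega, ?_⟩
      rw [Bool.or_eq_true]
      left
      rw [beq_iff_eq, PySem.List.slice_natCast_add]
      exact hw
    · refine ⟨i, by rw [List.mem_range]; omega, ?_⟩
      rw [Bool.or_eq_true]
      right
      simp only [Bool.and_eq_true, decide_eq_true_eq]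
      refine ⟨by exact_mod_cast hL2, ?_, ?_⟩
      · rw [show ((i : Int) + (s.length : Int) - 1) = ((i : Int) + ((s.length - 1 : Nat) : Int)) by omega]
        rw [PySem.List.slice_natCast_add, PySem.List.len_eq, beq_iff_eq]
        simp; omega
      · rw [show ((i : Int) + (s.length : Int) - 1) = ((i : Int) + ((s.length - 1 : Nat) : Int)) by omega]
        rw [PySem.List.slice_natCast_add]
        have hseglen : ((t.drop i).take (s.length - 1)).length + 1 = s.length := by
          simp; omega
        rw [beq_iff_eq, show ((lcpChars s ((t.drop i).take (s.length - 1)) : Int) + 1) = ((lcpChars s ((t.drop i).take (s.length - 1)) + 1 : Nat) : Int) by push_cast; ring]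
        rw [PySem.List.slice_from_natCast, PySem.List.slice_from_natCast]
        exact (crux s _ hseglen).mpr ⟨n, hn, hdel⟩

theorem core (t s : List Char) :
    (if PySem.Chars.isIn s t then true
     else if PySem.List.len s < 2 then false
     else (PySem.List.pyRange 0 (PySem.List.len s) 1).any (fun n =>
       PySem.Chars.isIn (PySem.List.slice s none (some n) ++ PySem.List.slice s (some (n + 1)) none) t))
    = ((PySem.List.pyRange 0 (PySem.List.len t + 1) 1).any (fun i =>
      (PySem.List.slice t (some i) (some (i + PySem.List.len s)) == s) ||
      (decide (2 ≤ PySem.List.len s) &&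
        ((PySem.List.len (PySem.List.slice t (some i) (some (i + PySem.List.len s - 1))) == PySem.List.len s - 1) &&
         (PySem.List.slice s (some ((lcpChars s (PySem.List.slice t (some i) (some (i + PySem.List.len s - 1))) : Int) + 1)) none ==
          PySem.List.slice (PySem.List.slice t (some i) (some (i + PySem.List.len s - 1))) (some ((lcpChars s (PySem.List.slice t (some i) (some (i + PySem.List.len s - 1))) : Int))) none))))) := by
  rw [Bool.eq_iff_iff, A_iff t s, B_iff t s]

-- ===== VERDICT (by name: the statement is the Claim_ definition above) =====
theorem istAhnlich_spec : Claim_equal_istAhnlich := by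
  intro dT sT _
  unfold Spec_istAhnlich istAhnlich istAhnlich_alt
  exact core (PySem.Chars.lower dT.toList) (PySem.Chars.lower sT.toList)
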